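-- pv_equiv track=rewrite | github.com/rom4ex/HashLava | gen_cli.py | get_indices_by_index
-- ===== SOURCE A (Python) =====
-- def get_indices_by_index(index, CHARACTERS, MIN_LENGTH, MAX_LENGTH):
--     indices = []
--     current_index = 0
--
--     for length in range(MIN_LENGTH, MAX_LENGTH + 1):
--         num_combinations = len(CHARACTERS) ** length
--
--         if current_index + num_combinations > index:
--             remaining_index = index - current_index
--             for _ in range(length):
--                 indices.append(remaining_index % len(CHARACTERS))
--                 remaining_index //= len(CHARACTERS)
--             break
--         else:
--             current_index += num_combinations
--
--     return indices[::-1]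
-- ===== SOURCE B (Python) =====
-- def get_indices_by_index(index, CHARACTERS, MIN_LENGTH, MAX_LENGTH):
--     if MIN_LENGTH > MAX_LENGTH:
--         # empty length range: there is no bucket at all
--         return []
--     base = len(CHARACTERS)
--     if base == 0:
--         # no characters: the only combination is the empty one; nothing to emit
--         return []
--     if base == 1:
--         # unary alphabet: bucket sizes are all 1, so the length is MIN_LENGTH + index
--         length = MIN_LENGTH + index
--         return [0] * length if length <= MAX_LENGTH else []
--     # number of combinations of lengths MIN..L-1 is (base**L - base**MIN)//(base-1),
--     # so index falls in the bucket of length L  iff  base**L <= t < base**(L+1)  for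
--     p = base ** MIN_LENGTH
--     t = index * (base - 1) + p
--     length = MIN_LENGTH
--     while p * base <= t:
--         p *= base
--         length += 1
--     if length > MAX_LENGTH:
--         return []
--     remaining = (t - p) // (base - 1)
--     # remaining has m digits in this base; the other length - m digits are leading zeros
--     m, q = 0, 1
--     while q <= remaining:
--         q *= base
--         m += 1
--     digits = [0] * (length - m)
--     while q > 1:
--         q //= base
--         digits.append(remaining // q)
--         remaining %= q
--     return digits
-- ===== Notes on version B (the rewrite author's own statement) =====
-- stated objective: alternative
-- what changed: B replaces A's cumulative scan over the lengths by a closed form: the bucket length is the digit count in base `base` of t = index*(base-1) + base**MIN_LENGTH (found by growing one power from base**MIN_LENGTH), and the digits are emitted most-significant-first — leading zeros counted directly, the rest by shrinking a power of the offset's size — so no cumulative offset and no final reversal exist; degenerate alphabets (0 or 1 characters) are handled directly.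
-- outside the precondition, e.g. on get_indices_by_index(-5, 'ab', 1, 2): A returns [1], B returns [0]; on get_indices_by_index(3, 'ab', -1, 2): A returns [1.5], B returns [1.0]
import Mathlib
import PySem

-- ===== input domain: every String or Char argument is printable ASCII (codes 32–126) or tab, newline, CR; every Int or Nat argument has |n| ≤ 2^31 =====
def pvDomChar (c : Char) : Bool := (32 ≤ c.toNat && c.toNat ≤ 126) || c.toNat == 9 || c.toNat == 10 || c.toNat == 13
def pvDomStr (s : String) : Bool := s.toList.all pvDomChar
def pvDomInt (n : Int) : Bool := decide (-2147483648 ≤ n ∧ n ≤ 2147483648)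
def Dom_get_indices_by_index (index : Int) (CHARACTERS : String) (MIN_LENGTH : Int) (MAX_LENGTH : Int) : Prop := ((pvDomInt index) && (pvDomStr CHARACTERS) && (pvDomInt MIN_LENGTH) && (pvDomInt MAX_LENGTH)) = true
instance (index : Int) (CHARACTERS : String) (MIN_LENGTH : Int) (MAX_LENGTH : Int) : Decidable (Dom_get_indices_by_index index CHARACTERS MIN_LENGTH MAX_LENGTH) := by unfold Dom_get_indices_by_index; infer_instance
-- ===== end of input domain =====

-- B replaces A's cumulative scan over the lengths by a closed form: the bucket length is
-- the digit count (in base `base`) of t = index*(base-1) + base**MIN_LENGTH, and the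
-- digits are then emitted most-significant-first by shrinking the power, with no reverse.

-- ===== PORT A =====
-- inner 'for _ in range(length)': appends remaining % base, then remaining //= base
def pvA_digits (n rem : Int) (k : Nat) (acc : List Int) : List Int :=
  match k with
  | 0 => acc
  | Nat.succ k => pvA_digits n (PySem.Int.floordiv rem n) k (acc ++ [PySem.Int.mod rem n])

-- the 'for length in range(MIN_LENGTH, MAX_LENGTH+1)' loop with current_index and break;
-- ported as fuel recursion over the range: L is the current length, fuel the number of
-- range elements still to visit, so 'break' stops without touching the rest of the range
def pvA_loop (index n cur L : Int) (fuel : Nat) : List Int :=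
  match fuel with
  | 0 => []
  | Nat.succ f =>
    let num := n ^ L.toNat          -- len(CHARACTERS) ** length (length ≥ 0 under Pre_)
    if cur + num > index then
      pvA_digits n (index - cur) L.toNat []
    else
      pvA_loop index n (cur + num) (L + 1) f

def get_indices_by_index (index : Int) (CHARACTERS : String) (MIN_LENGTH : Int) (MAX_LENGTH : Int) : List Int :=
  -- n = len(CHARACTERS); indices[::-1] is slice? with step -1 (never none for step -1)
  (PySem.List.slice? (pvA_loop index (CHARACTERS.toList.length : Int) 0 MIN_LENGTH (MAX_LENGTH + 1 - MIN_LENGTH).toNat) none none (-1)).getD []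

-- ===== PORT B =====
-- 'while p * base <= t: p *= base; length += 1' — fuel recursion (fuel t.toNat suffices:
-- p at least doubles each step); returns (length, p)
def pvB_find (b t p len : Int) (fuel : Nat) : Int × Int :=
  match fuel with
  | 0 => (len, p)
  | Nat.succ f => if p * b ≤ t then pvB_find b t (p * b) (len + 1) f else (len, p)

-- 'while q <= remaining: q *= base; m += 1' — digit count of remaining; returns (m, q)
def pvB_count (b rem q m : Int) (fuel : Nat) : Int × Int :=
  match fuel with
  | 0 => (m, q)
  | Nat.succ f => if q ≤ rem then pvB_count b rem (q * b) (m + 1) f else (m, q)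

-- 'while q > 1: q //= base; digits.append(remaining // q); remaining %= q'
def pvB_msb (b p rem : Int) (fuel : Nat) (acc : List Int) : List Int :=
  match fuel with
  | 0 => acc
  | Nat.succ f =>
    if 1 < p then
      pvB_msb b (PySem.Int.floordiv p b) (PySem.Int.mod rem (PySem.Int.floordiv p b)) f
        (acc ++ [PySem.Int.floordiv rem (PySem.Int.floordiv p b)])
    else acc

def get_indices_by_index_alt (index : Int) (CHARACTERS : String) (MIN_LENGTH : Int) (MAX_LENGTH : Int) : List Int :=
  if MAX_LENGTH < MIN_LENGTH then []   -- empty length range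
  else
  let base : Int := CHARACTERS.toList.length
  if base = 0 then []
  else if base = 1 then
    (if MIN_LENGTH + index ≤ MAX_LENGTH then List.replicate (MIN_LENGTH + index).toNat 0 else [])
  else
    let p0 := base ^ MIN_LENGTH.toNat   -- base ** MIN_LENGTH (MIN_LENGTH ≥ 0 under Pre_)
    let t := index * (base - 1) + p0
    let lp := pvB_find base t p0 MIN_LENGTH t.toNat
    if MAX_LENGTH < lp.1 then []
    else
      let R := PySem.Int.floordiv (t - lp.2) (base - 1)
      let c := pvB_count base R 1 0 (R.toNat + 1)
      pvB_msb base c.2 R c.2.toNat (List.replicate (lp.1 - c.1).toNat 0)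

-- ===== PRECONDITION & SPEC =====
-- Pre_ restricts to the function's natural domain (a nonnegative combination index and a
-- nonnegative minimum length), plus the trivial empty length range MAX_LENGTH < MIN_LENGTH.
-- Excluded: for negative index A emits base-complement digits of a negative offset
-- (outside the enumeration the function indexes), and for negative MIN_LENGTH with a
-- nonempty range A computes float powers so its result can leave List Int (e.g. [1.5]).
def Pre_get_indices_by_index (index : Int) (CHARACTERS : String) (MIN_LENGTH : Int) (MAX_LENGTH : Int) : Prop :=
  (0 ≤ index ∧ 0 ≤ MIN_LENGTH) ∨ MAX_LENGTH < MIN_LENGTH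
instance (index : Int) (CHARACTERS : String) (MIN_LENGTH : Int) (MAX_LENGTH : Int) : Decidable (Pre_get_indices_by_index index CHARACTERS MIN_LENGTH MAX_LENGTH) := by unfold Pre_get_indices_by_index; infer_instance

def pvWitness_get_indices_by_index : Int × String × Int × Int := (6, "abc", 1, 2)

def Spec_get_indices_by_index (index : Int) (CHARACTERS : String) (MIN_LENGTH : Int) (MAX_LENGTH : Int) (out : List Int) : Prop := out = get_indices_by_index_alt index CHARACTERS MIN_LENGTH MAX_LENGTH
instance (index : Int) (CHARACTERS : String) (MIN_LENGTH : Int) (MAX_LENGTH : Int) (out : List Int) : Decidable (Spec_get_indices_by_index index CHARACTERS MIN_LENGTH MAX_LENGTH out) := by unfold Spec_get_indices_by_index; infer_instance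

-- ===== CLAIM (what is proved, stated in full; the proofs are below) =====
def Claim_equal_get_indices_by_index : Prop := ∀ (index : Int) (CHARACTERS : String) (MIN_LENGTH : Int) (MAX_LENGTH : Int), Dom_get_indices_by_index index CHARACTERS MIN_LENGTH MAX_LENGTH → Pre_get_indices_by_index index CHARACTERS MIN_LENGTH MAX_LENGTH → Spec_get_indices_by_index index CHARACTERS MIN_LENGTH MAX_LENGTH (get_indices_by_index index CHARACTERS MIN_LENGTH MAX_LENGTH)


-- ===== LEMMAS AND PROOFS =====

-- proof-side canonical least-significant-first digit list (Euclidean div/mod)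
def edigits (b rem : Int) : Nat → List Int
  | 0 => []
  | Nat.succ k => rem % b :: edigits b (rem / b) k

theorem pvA_digits_acc (n rem : Int) (k : Nat) (acc : List Int) :
    pvA_digits n rem k acc = acc ++ pvA_digits n rem k [] := by
  induction k generalizing rem acc with
  | zero => simp [pvA_digits]
  | succ k ih =>
    rw [pvA_digits, pvA_digits, ih, ih (acc := [] ++ _)]
    simp

theorem pvB_msb_acc (b p rem : Int) (fuel : Nat) (acc : List Int) :
    pvB_msb b p rem fuel acc = acc ++ pvB_msb b p rem fuel [] := by
  induction fuel generalizing p rem acc with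
  | zero => simp [pvB_msb]
  | succ f ih =>
    rw [pvB_msb, pvB_msb]
    by_cases h : 1 < p
    · rw [if_pos h, if_pos h, ih, ih (acc := [] ++ _)]
      simp
    · simp [if_neg h]

theorem pvA_digits_eq_edigits (b : Int) (hb : 0 < b) (k : Nat) :
    ∀ rem : Int, pvA_digits b rem k [] = edigits b rem k := by
  induction k with
  | zero => intro rem; simp [pvA_digits, edigits]
  | succ k ih =>
    intro rem
    rw [pvA_digits, pvA_digits_acc, ih, edigits,
      PySem.Int.floordiv_eq_ediv_of_pos hb, PySem.Int.mod_eq_emod_of_pos hb]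
    simp

theorem edigits_snoc (b : Int) (hb : 0 < b) (k : Nat) :
    ∀ rem : Int, 0 ≤ rem → rem < b ^ (k + 1) →
      edigits b rem (k + 1) = edigits b (rem % b ^ k) k ++ [rem / b ^ k] := by
  induction k with
  | zero =>
    intro rem h0 h1
    rw [pow_one] at h1
    rw [edigits, edigits, edigits]
    rw [Int.emod_eq_of_lt h0 h1]
    simp
  | succ k ih =>
    intro rem h0 h1
    have hd0 : 0 ≤ rem / b := Int.ediv_nonneg h0 (le_of_lt hb)
    have hd1 : rem / b < b ^ (k + 1) := by
      rw [Int.ediv_lt_iff_lt_mul hb]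
      calc rem < b ^ (k + 2) := h1
        _ = b ^ (k + 1) * b := by ring
    have key1 : (rem % b ^ (k + 1)) % b = rem % b :=
      Int.emod_emod_of_dvd rem (dvd_pow_self b (Nat.succ_ne_zero k))
    have key3 : rem / b / b ^ k = rem / b ^ (k + 1) := by
      rw [Int.ediv_ediv_of_nonneg (le_of_lt hb)]
      congr 1
      ring
    have key2 : (rem % b ^ (k + 1)) / b = (rem / b) % b ^ k := by
      have e1 : rem % b ^ (k + 1) = rem - b ^ (k + 1) * (rem / b ^ (k + 1)) := Int.emod_def _ _
      have e2 : (rem / b) % b ^ k = rem / b - b ^ k * (rem / b / b ^ k) := Int.emod_def _ _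
      rw [e1, e2, key3]
      have e3 : rem - b ^ (k + 1) * (rem / b ^ (k + 1))
          = rem + b * (-(b ^ k * (rem / b ^ (k + 1)))) := by ring
      rw [e3, Int.add_mul_ediv_left _ _ (ne_of_gt hb)]
      ring
    calc edigits b rem (k + 2)
        = rem % b :: edigits b (rem / b) (k + 1) := rfl
      _ = rem % b :: (edigits b ((rem / b) % b ^ k) k ++ [rem / b / b ^ k]) := by
          rw [ih _ hd0 hd1]
      _ = (rem % b ^ (k + 1)) % b ::
            (edigits b ((rem % b ^ (k + 1)) / b) k ++ [rem / b ^ (k + 1)]) := by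
          rw [key1, key2, key3]
      _ = edigits b (rem % b ^ (k + 1)) (k + 1) ++ [rem / b ^ (k + 1)] := rfl

theorem pvB_msb_spec (b : Int) (hb : 2 ≤ b) (k : Nat) :
    ∀ (fuel : Nat) (rem : Int), k ≤ fuel → 0 ≤ rem → rem < b ^ k →
      pvB_msb b (b ^ k) rem fuel [] = (edigits b rem k).reverse := by
  induction k with
  | zero =>
    intro fuel rem _ _ _
    cases fuel with
    | zero => simp [pvB_msb, edigits]
    | succ f => simp [pvB_msb, edigits]
  | succ k ih =>
    intro fuel rem hfuel h0 h1
    have hb0 : (0:Int) < b := by omega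
    obtain ⟨f, rfl⟩ : ∃ f, fuel = f + 1 := ⟨fuel - 1, by omega⟩
    have hp1 : (1:Int) < b ^ (k + 1) :=
      one_lt_pow₀ (by omega) (Nat.succ_ne_zero k)
    have hdiv : PySem.Int.floordiv (b ^ (k + 1)) b = b ^ k := by
      rw [PySem.Int.floordiv_eq_ediv_of_pos hb0]
      have e : b ^ (k + 1) = b ^ k * b := by ring
      rw [e, Int.mul_ediv_cancel _ (ne_of_gt hb0)]
    have hbk : (0:Int) < b ^ k := pow_pos hb0 _
    rw [pvB_msb, if_pos hp1, hdiv, pvB_msb_acc]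
    rw [PySem.Int.mod_eq_emod_of_pos hbk, PySem.Int.floordiv_eq_ediv_of_pos hbk]
    rw [ih f (rem % b ^ k) (by omega) (Int.emod_nonneg _ (ne_of_gt hbk)) (Int.emod_lt_of_pos _ hbk)]
    rw [edigits_snoc b hb0 k rem h0 h1]
    simp

theorem pvB_find_spec (b t : Int) (hb : 2 ≤ b) :
    ∀ (fuel : Nat) (p len : Int), 1 ≤ p → p ≤ t → 0 ≤ len → p = b ^ len.toNat →
      (t - p).toNat < fuel →
      0 ≤ (pvB_find b t p len fuel).1 ∧ len ≤ (pvB_find b t p len fuel).1 ∧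
      (pvB_find b t p len fuel).2 = b ^ (pvB_find b t p len fuel).1.toNat ∧
      (pvB_find b t p len fuel).2 ≤ t ∧ t < (pvB_find b t p len fuel).2 * b := by
  intro fuel
  induction fuel with
  | zero => intro p len h1 h2 _ _ hf; omega
  | succ f ih =>
    intro p len h1 h2 hlen hpow hf
    rw [pvB_find]
    by_cases hc : p * b ≤ t
    · rw [if_pos hc]
      have hstep : p + 1 ≤ p * b := by nlinarith
      have hpow' : p * b = b ^ (len + 1).toNat := by
        have e : (len + 1).toNat = len.toNat + 1 := by omega
        rw [e, pow_succ, ← hpow]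
      have hres := ih (p * b) (len + 1) (by omega) hc (by omega) hpow' (by omega)
      exact ⟨hres.1, by omega, hres.2.2.1, hres.2.2.2.1, hres.2.2.2.2⟩
    · rw [if_neg hc]
      refine ⟨hlen, le_refl _, hpow, h2, ?_⟩
      show t < p * b
      omega

theorem pvB_count_spec (b : Int) (hb : 2 ≤ b) (rem : Int) (h0 : 0 ≤ rem) :
    ∀ (fuel : Nat) (q m : Int), 1 ≤ q → q ≤ rem * b + 1 → 0 ≤ m → q = b ^ m.toNat →
      (rem + 1 - q).toNat < fuel →
      0 ≤ (pvB_count b rem q m fuel).1 ∧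
      (pvB_count b rem q m fuel).2 = b ^ (pvB_count b rem q m fuel).1.toNat ∧
      rem < (pvB_count b rem q m fuel).2 ∧
      (pvB_count b rem q m fuel).2 ≤ rem * b + 1 := by
  intro fuel
  induction fuel with
  | zero => intro q m h1 h2 hm hpow hf; omega
  | succ f ih =>
    intro q m h1 h2 hm hpow hf
    rw [pvB_count]
    by_cases hc : q ≤ rem
    · rw [if_pos hc]
      have hstep : q + 1 ≤ q * b := by nlinarith
      have hle' : q * b ≤ rem * b + 1 := by nlinarith
      have hpow' : q * b = b ^ (m + 1).toNat := by
        have e : (m + 1).toNat = m.toNat + 1 := by omega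
        rw [e, pow_succ, ← hpow]
      exact ih (q * b) (m + 1) (by omega) hle' (by omega) hpow' (by omega)
    · rw [if_neg hc]
      refine ⟨hm, hpow, ?_, ?_⟩
      · show rem < q
        omega
      · show q ≤ rem * b + 1
        exact h2

theorem edigits_zero (b : Int) (k : Nat) : edigits b 0 k = List.replicate k 0 := by
  induction k with
  | zero => rfl
  | succ k ih =>
    rw [edigits, Int.zero_emod, Int.zero_ediv, ih]
    simp [List.replicate_succ]

theorem edigits_split (b : Int) (hb : 0 < b) (m : Nat) :
    ∀ (L : Nat) (rem : Int), m ≤ L → 0 ≤ rem → rem < b ^ m →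
      edigits b rem L = edigits b rem m ++ List.replicate (L - m) 0 := by
  induction m with
  | zero =>
    intro L rem _ h0 h1
    rw [pow_zero] at h1
    have hz : rem = 0 := by omega
    subst hz
    rw [edigits_zero]
    simp [edigits]
  | succ m ih =>
    intro L rem hml h0 h1
    obtain ⟨L', rfl⟩ : ∃ L', L = L' + 1 := ⟨L - 1, by omega⟩
    rw [edigits, edigits]
    have hd0 : 0 ≤ rem / b := Int.ediv_nonneg h0 (le_of_lt hb)
    have hd1 : rem / b < b ^ m := by
      rw [Int.ediv_lt_iff_lt_mul hb]
      calc rem < b ^ (m + 1) := h1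
        _ = b ^ m * b := by ring
    rw [ih L' (rem / b) (by omega) hd0 hd1]
    have e : L' + 1 - (m + 1) = L' - m := by omega
    rw [e]
    simp

theorem pvA_loop_zero (index : Int) (hidx : 0 ≤ index) :
    ∀ (fuel : Nat) (L cur : Int), cur ≤ index → pvA_loop index 0 cur L fuel = [] := by
  intro fuel
  induction fuel with
  | zero => intro L cur _; rfl
  | succ f ih =>
    intro L cur hcur
    rw [pvA_loop]
    by_cases hL : L.toNat = 0
    · simp only [hL, pow_zero]
      by_cases hc : cur + 1 > index
      · rw [if_pos hc]
        simp [pvA_digits, hL]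
      · rw [if_neg hc]
        exact ih _ _ (by omega)
    · have hz : (0:Int) ^ L.toNat = 0 := zero_pow hL
      simp only [hz, add_zero]
      rw [if_neg (by omega)]
      exact ih _ _ (by omega)

theorem pvA_digits_one (k : Nat) :
    ∀ acc : List Int, pvA_digits 1 0 k acc = acc ++ List.replicate k 0 := by
  induction k with
  | zero => intro acc; simp [pvA_digits]
  | succ k ih =>
    intro acc
    rw [pvA_digits]
    have hm : PySem.Int.mod 0 1 = 0 := by
      rw [PySem.Int.mod_eq_emod_of_pos one_pos]; simp
    have hd : PySem.Int.floordiv 0 1 = 0 := by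
      rw [PySem.Int.floordiv_eq_ediv_of_pos one_pos]; simp
    rw [hm, hd, ih]
    simp [List.replicate_succ]

theorem pvA_loop_one (index : Int) (hidx : 0 ≤ index) :
    ∀ (fuel : Nat) (L cur : Int), 0 ≤ cur → cur ≤ index →
      pvA_loop index 1 cur L fuel =
        if (index - cur).toNat < fuel then pvA_digits 1 0 (L + (index - cur)).toNat [] else [] := by
  intro fuel
  induction fuel with
  | zero => intro L cur _ _; simp [pvA_loop]
  | succ f ih =>
    intro L cur h0 h1
    rw [pvA_loop]
    simp only [one_pow]
    by_cases hc : cur + 1 > index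
    · have h2 : index - cur = 0 := by omega
      rw [if_pos hc, if_pos (by omega), h2]
      simp
    · rw [if_neg hc, ih _ _ (by omega) (by omega)]
      have harg : L + 1 + (index - (cur + 1)) = L + (index - cur) := by ring
      rw [harg]
      by_cases hf : (index - (cur + 1)).toNat < f
      · rw [if_pos hf, if_pos (by omega)]
      · rw [if_neg hf, if_neg (by omega)]

theorem pvA_loop_two (b index MINv : Int) (hb : 2 ≤ b) (hidx : 0 ≤ index) (hmin : 0 ≤ MINv)
    (Ls P : Int) (hLs0 : 0 ≤ Ls) (hP : P = b ^ Ls.toNat)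
    (hPle : P ≤ index * (b - 1) + b ^ MINv.toNat)
    (hPgt : index * (b - 1) + b ^ MINv.toNat < P * b) :
    ∀ (fuel : Nat) (L cur : Int), MINv ≤ L → L ≤ Ls → 0 ≤ L →
      cur * (b - 1) = b ^ L.toNat - b ^ MINv.toNat →
      ∀ MAXv : Int, fuel = (MAXv + 1 - L).toNat →
      pvA_loop index b cur L fuel =
        if Ls ≤ MAXv then
          pvA_digits b
            (PySem.Int.floordiv (index * (b - 1) + b ^ MINv.toNat - P) (b - 1)) Ls.toNat []
        else [] := by
  intro fuel
  induction fuel with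
  | zero =>
    intro L cur hL1 hL2 hL0 hcur MAXv hf
    rw [pvA_loop, if_neg (by omega)]
  | succ f ih =>
    intro L cur hL1 hL2 hL0 hcur MAXv hf
    have hLMAX : L ≤ MAXv := by omega
    have hb1 : (0:Int) < b - 1 := by omega
    have hprod : (cur + b ^ L.toNat) * (b - 1) = b ^ L.toNat * b - b ^ MINv.toNat := by
      linear_combination hcur
    have hcond : (cur + b ^ L.toNat > index) ↔
        (index * (b - 1) + b ^ MINv.toNat < b ^ L.toNat * b) := by
      constructor
      · intro h
        nlinarith [mul_lt_mul_of_pos_right h hb1]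
      · intro h
        by_contra hcontra
        push_neg at hcontra
        nlinarith [mul_le_mul_of_nonneg_right hcontra (le_of_lt hb1)]
    rw [pvA_loop]
    by_cases hc : L = Ls
    · subst hc
      have ht : index * (b - 1) + b ^ MINv.toNat < b ^ L.toNat * b := by
        rw [← hP]; exact hPgt
      rw [if_pos (hcond.mpr ht), if_pos (by omega)]
      congr 1
      rw [PySem.Int.floordiv_eq_ediv_of_pos hb1]
      have hform : index * (b - 1) + b ^ MINv.toNat - P = (index - cur) * (b - 1) := by
        rw [hP]; linear_combination hcur
      rw [hform, Int.mul_ediv_cancel _ (ne_of_gt hb1)]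
    · have hLlt : L < Ls := by omega
      have hle : b ^ (L.toNat + 1) ≤ b ^ Ls.toNat := pow_le_pow_right₀ (by omega) (by omega)
      rw [pow_succ] at hle
      have hnot : ¬ (index * (b - 1) + b ^ MINv.toNat < b ^ L.toNat * b) := by
        rw [← hP] at hle
        exact not_lt.mpr (le_trans hle hPle)
      rw [if_neg (fun h => hnot (hcond.mp h))]
      apply ih (L + 1) (cur + b ^ L.toNat) (by omega) (by omega) (by omega) ?_ MAXv (by omega)
      have hT : (L + 1).toNat = L.toNat + 1 := by omega
      rw [hT, pow_succ]
      linear_combination hcur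

-- ===== VERDICT (by name: the statement is the Claim_ definition above) =====
theorem get_indices_by_index_spec : Claim_equal_get_indices_by_index := by
  intro index CHARACTERS MINv MAXv _ hpre
  unfold Spec_get_indices_by_index get_indices_by_index
  simp only [get_indices_by_index_alt]
  rw [PySem.List.slice?_none_none_neg_one]
  simp only [Option.getD_some]
  by_cases hMM : MAXv < MINv
  · rw [if_pos hMM]
    have hz : (MAXv + 1 - MINv).toNat = 0 := by omega
    rw [hz, pvA_loop]
    rfl
  obtain ⟨hidx, hmin⟩ := hpre.resolve_right hMM
  rw [if_neg hMM]
  set b : Int := (CHARACTERS.toList.length : Int) with hbdef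
  have hbnn : 0 ≤ b := by positivity
  by_cases h0 : b = 0
  · rw [if_pos h0, h0, pvA_loop_zero index hidx _ _ _ hidx]
    rfl
  rw [if_neg h0]
  by_cases h1 : b = 1
  · rw [if_pos h1, h1, pvA_loop_one index hidx _ _ _ (le_refl 0) hidx]
    by_cases hle : MINv + index ≤ MAXv
    · rw [if_pos (by omega), if_pos hle, pvA_digits_one]
      simp
    · rw [if_neg (by omega), if_neg hle]
      rfl
  · rw [if_neg h1]
    have hb : 2 ≤ b := by omega
    have hb1 : (0:Int) < b - 1 := by omega
    set t : Int := index * (b - 1) + b ^ MINv.toNat with htdef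
    have hm1 : (1:Int) ≤ b ^ MINv.toNat := one_le_pow₀ (by omega)
    have hnn : 0 ≤ index * (b - 1) := mul_nonneg hidx (by omega)
    have ht1 : 1 ≤ t := by omega
    have hfind := pvB_find_spec b t hb t.toNat (b ^ MINv.toNat) MINv hm1 (by omega) hmin
      rfl (by omega)
    set r := pvB_find b t (b ^ MINv.toNat) MINv t.toNat with hrdef
    obtain ⟨hr0, hrMIN, hrpow, hrle, hrgt⟩ := hfind
    have hloop := pvA_loop_two b index MINv hb hidx hmin r.1 r.2 hr0 hrpow hrle hrgt
      ((MAXv + 1 - MINv).toNat) MINv 0 (le_refl _) hrMIN hmin (by ring) MAXv rfl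
    rw [hloop]
    by_cases hLM : r.1 ≤ MAXv
    · rw [if_pos hLM, if_neg (by omega)]
      set R : Int := PySem.Int.floordiv (t - r.2) (b - 1) with hRdef
      rw [PySem.Int.floordiv_eq_ediv_of_pos hb1] at hRdef
      have hR0 : 0 ≤ R := hRdef ▸ Int.ediv_nonneg (by omega) (by omega)
      have hR1 : R < b ^ r.1.toNat := by
        rw [hRdef, Int.ediv_lt_iff_lt_mul hb1]
        nlinarith [hrgt, hrpow]
      have hcount := pvB_count_spec b hb R hR0 (R.toNat + 1) 1 0 (le_refl 1)
        (by nlinarith) (le_refl 0) (by simp) (by omega)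
      set c := pvB_count b R 1 0 (R.toNat + 1) with hcdef
      obtain ⟨hc0, hcpow, hclt, hcle⟩ := hcount
      have hcleR : c.1 ≤ r.1 := by
        by_contra hcon
        push_neg at hcon
        have hstep : r.1.toNat + 1 ≤ c.1.toNat := by omega
        have h2 : b ^ (r.1.toNat + 1) ≤ b ^ c.1.toNat := pow_le_pow_right₀ (by omega) hstep
        rw [pow_succ, ← hcpow] at h2
        have h3 : (R + 1) * b ≤ b ^ r.1.toNat * b :=
          mul_le_mul_of_nonneg_right (by omega) (by omega)
        nlinarith
      have hfuel : c.1.toNat ≤ c.2.toNat := by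
        have h2k : (2:Int) ^ c.1.toNat ≤ b ^ c.1.toNat := by
          apply pow_le_pow_left₀ (by norm_num) hb
        have hnat : (c.1.toNat : Int) < (2:Int) ^ c.1.toNat := by
          have := Nat.lt_two_pow_self (n := c.1.toNat)
          exact_mod_cast this
        have : (c.1.toNat : Int) < c.2 := by
          rw [hcpow]; exact lt_of_lt_of_le hnat h2k
        omega
      have hcltp : R < b ^ c.1.toNat := hcpow ▸ hclt
      rw [hcpow] at hfuel
      rw [pvA_digits_eq_edigits b (by omega),
        edigits_split b (by omega) c.1.toNat r.1.toNat R (by omega) hR0 hcltp,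
        pvB_msb_acc, hcpow,
        pvB_msb_spec b hb c.1.toNat (b ^ c.1.toNat).toNat R hfuel hR0 hcltp]
      have hrep : (r.1 - c.1).toNat = r.1.toNat - c.1.toNat := by omega
      rw [hrep]
      simp
    · rw [if_neg hLM, if_pos (by omega)]
      rfl
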